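-- pv_equiv track=rewrite | github.com/tor1968uy/TensorTonic-Solutions | lag-features/lag-features.py | lag_features
-- ===== SOURCE A (Python) =====
-- def lag_features(series, lags):
--     """
--     Create a lag feature matrix from the time series.
--     Returns: A list of lists representing the feature matrix.
--     """
--     # 1. Determine the maximum lag to know where we can safely start
--     max_lag = max(lags)
--     n = len(series)
--
--     feature_matrix = []
--
--     # 2. Iterate from the first valid time step to the end
--     # We start at max_lag because any index smaller would have missing lags
--     for t in range(max_lag, n):
--         row = []
--         # 3. For each lag specified, look back from the current time t
--         for lag in lags:
--             # Value at time t-1, t-2, etc.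
--             val = series[t - lag]
--             row.append(val)
--
--         feature_matrix.append(row)
--
--     return feature_matrix
-- ===== SOURCE B (Python) =====
-- def lag_features(series, lags):
--     """
--     Create a lag feature matrix from the time series.
--     Returns: A list of lists representing the feature matrix.
--     """
--     # Column-wise: each lag gives one full column as a slice, then transpose.
--     max_lag = max(lags)
--     n = len(series)
--     if n <= max_lag:
--         return []
--     cols = [series[max_lag - lag : n - lag] for lag in lags]
--     return [[col[i] for col in cols] for i in range(n - max_lag)]
-- ===== Notes on version B (the rewrite author's own statement) =====
-- stated objective: alternative
-- what changed: B builds the matrix column-by-column (one slice of the series per lag) and then transposes by index, instead of A's row-by-row double loop with per-element t-lag indexing.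
import Mathlib
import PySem

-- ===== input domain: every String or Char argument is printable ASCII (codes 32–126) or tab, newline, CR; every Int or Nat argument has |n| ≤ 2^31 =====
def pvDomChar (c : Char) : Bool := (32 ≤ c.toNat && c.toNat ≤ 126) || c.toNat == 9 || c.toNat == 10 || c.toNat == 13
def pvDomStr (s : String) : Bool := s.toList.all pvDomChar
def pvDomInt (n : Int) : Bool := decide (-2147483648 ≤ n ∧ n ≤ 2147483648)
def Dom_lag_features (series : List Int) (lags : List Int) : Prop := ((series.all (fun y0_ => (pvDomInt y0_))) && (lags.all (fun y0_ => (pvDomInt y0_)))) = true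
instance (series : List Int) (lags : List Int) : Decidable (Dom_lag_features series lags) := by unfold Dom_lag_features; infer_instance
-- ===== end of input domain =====

-- B computes the same matrix column-by-column (one slice per lag, then an index transpose); alternative decomposition, same cost.

-- ===== PORT A =====
-- row-by-row: for t in range(max_lag, n): row = [series[t-lag] for lag in lags] (built by appends, as in A)
def lag_features (series : List Int) (lags : List Int) : List (List Int) :=
  match PySem.List.max? lags id with
  | none => []  -- unreachable under Pre_ (max([]) raises ValueError)
  | some max_lag =>
    let n : Int := series.length
    (PySem.List.pyRange max_lag n 1).foldl (fun fm t =>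
      fm ++ [lags.foldl (fun row lag => row ++ [(PySem.List.pyGet? series (t - lag)).getD 0]) []]) []

-- ===== PORT B =====
-- column-wise: cols = [series[max_lag-lag : n-lag] for lag in lags]; rows by index transpose
def lag_features_alt (series : List Int) (lags : List Int) : List (List Int) :=
  match PySem.List.max? lags id with
  | none => []  -- unreachable under Pre_ (max([]) raises ValueError)
  | some max_lag =>
    let n : Int := series.length
    if n ≤ max_lag then []
    else
      let cols := lags.map (fun lag => PySem.List.slice series (some (max_lag - lag)) (some (n - lag)))
      (PySem.List.pyRange 0 (n - max_lag) 1).map (fun i =>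
        cols.map (fun col => (PySem.List.pyGet? col i).getD 0))

-- ===== PRECONDITION & SPEC =====
-- Pre_ excludes exactly the inputs on which A raises: empty lags (ValueError from max), and
-- any negative lag when the row loop is nonempty (series[t-lag] eventually indexes past the end: IndexError).
def Pre_lag_features (series : List Int) (lags : List Int) : Prop :=
  lags ≠ [] ∧ ((∀ l ∈ lags, 0 ≤ l) ∨ (∃ l ∈ lags, (series.length : Int) ≤ l))
instance (series : List Int) (lags : List Int) : Decidable (Pre_lag_features series lags) := by unfold Pre_lag_features; infer_instance

def pvWitness_lag_features : List Int × List Int := ([1, 2, 3, 4, 5], [1, 2])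

def Spec_lag_features (series : List Int) (lags : List Int) (out : List (List Int)) : Prop := out = lag_features_alt series lags
instance (series : List Int) (lags : List Int) (out : List (List Int)) : Decidable (Spec_lag_features series lags out) := by unfold Spec_lag_features; infer_instance

-- ===== CLAIM (what is proved, stated in full; the proofs are below) =====
def Claim_equal_lag_features : Prop := ∀ (series : List Int) (lags : List Int), Dom_lag_features series lags → Pre_lag_features series lags → Spec_lag_features series lags (lag_features series lags)

-- ===== LEMMAS AND PROOFS =====

-- A's nested append-loops are maps over the range / over lags.
theorem lag_features_eq_map (series : List Int) (lags : List Int) (m : Int)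
    (hmax : PySem.List.max? lags id = some m) :
    lag_features series lags =
      (PySem.List.pyRange m (series.length : Int) 1).map (fun t =>
        lags.map (fun lag => (PySem.List.pyGet? series (t - lag)).getD 0)) := by
  unfold lag_features
  rw [hmax]
  simp only [PySem.List.foldl_append_singleton_eq_map, List.nil_append]

-- One matrix entry: under the bounds, the sliced column indexed at k is series indexed at m + k - lag.
theorem entry_eq (series : List Int) (m lag : Int) (k : Nat)
    (hlm : lag ≤ m) (hmn : m < (series.length : Int))
    (hk : k < ((series.length : Int) - m).toNat) :
    (PySem.List.pyGet? (PySem.List.slice series (some (m - lag)) (some ((series.length : Int) - lag))) (k : Int)).getD 0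
      = (PySem.List.pyGet? series (m + (k : Int) - lag)).getD 0 := by
  rw [PySem.List.slice_toNat _ (by omega) (by omega)]
  rw [PySem.List.pyGet?_natCast, PySem.List.pyGet?_of_nonneg _ (by omega)]
  rw [List.getElem?_take_of_lt (by omega), List.getElem?_drop]
  have h1 : (m - lag).toNat + k = (m + (k : Int) - lag).toNat := by omega
  rw [h1]

-- ===== VERDICT (by name: the statement is the Claim_ definition above) =====
theorem lag_features_spec : Claim_equal_lag_features := by
  intro series lags _ hpre
  obtain ⟨hne, hcase⟩ := hpre
  obtain ⟨m, hmax⟩ : ∃ m, PySem.List.max? lags id = some m := by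
    cases h : PySem.List.max? lags id with
    | none => exact absurd ((PySem.List.max?_eq_none_iff lags id).mp h) hne
    | some m => exact ⟨m, rfl⟩
  have hmem : m ∈ lags := PySem.List.max?_mem hmax
  have hub : ∀ l ∈ lags, l ≤ m := fun l hl => PySem.List.max?_isMax hmax l hl
  show lag_features series lags = lag_features_alt series lags
  rw [lag_features_eq_map series lags m hmax]
  unfold lag_features_alt
  rw [hmax]
  simp only []
  by_cases hmn : (series.length : Int) ≤ m
  · rw [if_pos hmn, PySem.List.pyRange_one_eq_nil hmn, List.map_nil]
  · rw [if_neg hmn]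
    rw [not_le] at hmn
    rw [PySem.List.pyRange_one m (series.length : Int), PySem.List.pyRange_one 0 ((series.length : Int) - m)]
    simp only [sub_zero, List.map_map]
    apply List.map_congr_left
    intro k hk
    rw [List.mem_range] at hk
    simp only [Function.comp, zero_add]
    apply List.map_congr_left
    intro lag hlag
    simp only [Function.comp]
    exact (entry_eq series m lag k (hub lag hlag) hmn hk).symm
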